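-- pv_equiv track=rewrite | github.com/tedlaz/logistiki | qlogistiki/utils.py | account_tree
-- ===== SOURCE A (Python) =====
-- def account_tree(account: str, reversed=False, splitter='.') -> tuple:
--     try:
--         spl = account.split(splitter)
--     except Exception:
--         return ('', )
--     lvls = [splitter.join(spl[: i + 1]) for i in range(len(spl))]
--     if reversed:
--         lvls.reverse()
--     return tuple(lvls)
-- ===== SOURCE B (Python) =====
-- def account_tree(account: str, reversed=False, splitter='.') -> tuple:
--     try:
--         parts = account.split(splitter)
--     except Exception:
--         return ('',)
--     lvls = []
--     prefix = ''
--     for idx, part in enumerate(parts):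
--         prefix = part if idx == 0 else prefix + splitter + part
--         lvls.append(prefix)
--     if reversed:
--         lvls.reverse()
--     return tuple(lvls)
-- ===== Notes on version B (the rewrite author's own statement) =====
-- stated objective: alternative
-- what changed: Replaces the comprehension that re-slices and re-joins the whole prefix for every level with a single loop threading a running-prefix accumulator, extending it by one part per step.
import Mathlib
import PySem

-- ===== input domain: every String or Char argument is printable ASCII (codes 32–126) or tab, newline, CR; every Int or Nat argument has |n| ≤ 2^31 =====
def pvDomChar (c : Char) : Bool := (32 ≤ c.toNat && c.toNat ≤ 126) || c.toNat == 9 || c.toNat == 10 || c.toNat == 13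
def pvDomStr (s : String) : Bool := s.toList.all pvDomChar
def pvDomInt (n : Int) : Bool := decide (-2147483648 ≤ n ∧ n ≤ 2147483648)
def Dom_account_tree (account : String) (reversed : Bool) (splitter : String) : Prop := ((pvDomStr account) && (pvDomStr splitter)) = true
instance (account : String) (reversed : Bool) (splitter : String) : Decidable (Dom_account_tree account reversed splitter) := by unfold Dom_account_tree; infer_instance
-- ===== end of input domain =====

-- B replaces the per-level slice-and-join comprehension with one loop threading a
-- running-prefix accumulator (one append per part); same return value, alternative decomposition.


-- ===== PORT A =====
-- account.split(splitter) raises ValueError exactly when splitter = "" (the except branch);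
-- PySem.Str.split? returns none exactly there.  spl[:i+1] with i ≥ 0 is List.take (i+1).
def account_tree (account : String) (reversed : Bool) (splitter : String) : List String :=
  match PySem.Str.split? account splitter with
  | none => [""]
  | some spl =>
    let lvls := (List.range spl.length).map (fun i => PySem.Str.join splitter (spl.take (i + 1)))
    if reversed then lvls.reverse else lvls

-- ===== PORT B =====
-- the loop body after the first iteration: prefix = prefix + splitter + part; append prefix
def accTreeGo (splitter prefixStr : String) : List String → List String
  | [] => []
  | p :: rest =>
    let np := prefixStr ++ splitter ++ p
    np :: accTreeGo splitter np rest

def account_tree_alt (account : String) (reversed : Bool) (splitter : String) : List String :=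
  match PySem.Str.split? account splitter with
  | none => [""]
  | some parts =>
    -- first iteration seeds prefix = part (idx = 0), the rest run accTreeGo
    let lvls := match parts with
      | [] => []
      | p0 :: rest => p0 :: accTreeGo splitter p0 rest
    if reversed then lvls.reverse else lvls

-- ===== PRECONDITION & SPEC =====
def Spec_account_tree (account : String) (reversed : Bool) (splitter : String) (out : List String) : Prop := out = account_tree_alt account reversed splitter
instance (account : String) (reversed : Bool) (splitter : String) (out : List String) : Decidable (Spec_account_tree account reversed splitter out) := by unfold Spec_account_tree; infer_instance

-- ===== CLAIM (what is proved, stated in full; the proofs are below) =====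
def Claim_equal_account_tree : Prop := ∀ (account : String) (reversed : Bool) (splitter : String), Dom_account_tree account reversed splitter → Spec_account_tree account reversed splitter (account_tree account reversed splitter)

-- ===== LEMMAS AND PROOFS =====

theorem strJoin_singleton (sep s : String) : PySem.Str.join sep [s] = s := by
  rw [← String.toList_inj, PySem.Str.toList_join]
  simp [PySem.Chars.join, List.intercalate]

theorem strJoin_cons_cons (sep p q : String) (rest : List String) :
    PySem.Str.join sep (p :: q :: rest) = p ++ sep ++ PySem.Str.join sep (q :: rest) := by
  rw [← String.toList_inj, PySem.Str.toList_join]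
  simp [String.toList_append, PySem.Str.toList_join, PySem.Chars.join_cons_cons]

theorem strJoin_glue (sep a b : String) (ys : List String) :
    PySem.Str.join sep ((a ++ sep ++ b) :: ys) = a ++ sep ++ PySem.Str.join sep (b :: ys) := by
  cases ys with
  | nil => rw [strJoin_singleton, strJoin_singleton]
  | cons y yt =>
    rw [strJoin_cons_cons, strJoin_cons_cons]
    simp [String.append_assoc]

theorem accTreeGo_eq (sep pre : String) (t : List String) :
    accTreeGo sep pre t
      = (List.range t.length).map (fun i => PySem.Str.join sep (pre :: t.take (i + 1))) := by
  induction t generalizing pre with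
  | nil => rfl
  | cons p rest ih =>
    simp only [accTreeGo, List.length_cons, List.range_succ_eq_map, List.map_cons, List.map_map]
    congr 1
    · rw [List.take_succ_cons, List.take_zero, strJoin_cons_cons, strJoin_singleton]
    · rw [ih]
      apply List.map_congr_left
      intro i _
      simp only [Function.comp_apply, Nat.succ_eq_add_one, List.take_succ_cons, strJoin_glue, strJoin_cons_cons]

theorem levels_eq (sep : String) (spl : List String) :
    (List.range spl.length).map (fun i => PySem.Str.join sep (spl.take (i + 1)))
      = match spl with
        | [] => []
        | p0 :: rest => p0 :: accTreeGo sep p0 rest := by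
  cases spl with
  | nil => rfl
  | cons p0 rest =>
    simp only [List.length_cons, List.range_succ_eq_map, List.map_cons, List.map_map]
    congr 1
    · rw [List.take_succ_cons, List.take_zero, strJoin_singleton]
    · rw [accTreeGo_eq]
      apply List.map_congr_left
      intro i _
      simp only [Function.comp_apply, List.take_succ_cons]

-- ===== VERDICT (by name: the statement is the Claim_ definition above) =====
theorem account_tree_spec : Claim_equal_account_tree := by
  intro account reversed splitter _
  unfold Spec_account_tree account_tree account_tree_alt
  cases h : PySem.Str.split? account splitter with
  | none => rfl
  | some spl => simp only [levels_eq]
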